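-- pv_equiv track=rewrite | github.com/ByteInternet/hypernode-docs-next | hypernode/downloader/main.py | remove_old_table_of_contents
-- ===== SOURCE A (Python) =====
-- from textwrap import dedent
--
-- def remove_old_table_of_contents(content: str, replace: bool = False) -> str:
--     parsed_lines = []
--     stripping_toc = False
--     stripping_done = False
--     toc_placeholder = "___toc_placeholder___"
--
--     for line in content.splitlines():
--         stripped_line = line.strip()
--
--         if stripped_line == "**TABLE OF CONTENTS**" and not stripping_done:
--             stripping_toc = True
--             parsed_lines.append(toc_placeholder)
--             continue
--
--         if stripping_toc:
--             if not stripped_line: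
--                 continue
--             if (
--                 stripped_line.startswith("* [")
--                 or stripped_line.startswith("+ [")
--                 or stripped_line.startswith("- [")
--             ):
--                 continue
--             else:
--                 stripping_toc = False
--                 stripping_done = True
--
--         if not stripping_toc:
--             parsed_lines.append(line)
--
--     if stripping_toc and not stripping_done:
--         raise Exception("Unfinished Table of Contents found!")
--
--     content = "\n".join(parsed_lines)
--
--     if replace:
--         # @TODO(timon): this behavior needs a test too, but the feature can probably be disregarded.
--         SPHINX_TOC = """
--         ```{contents}
--         :caption: 'Table of Contents'
--         :depth: 3
--         :backlinks: none
--         ```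
--         """
--         content = content.replace(toc_placeholder, dedent(SPHINX_TOC).lstrip())
--     else:
--         content = content.replace(toc_placeholder, "")
--
--     return content
-- ===== SOURCE B (Python) =====
-- from textwrap import dedent
--
--
-- def remove_old_table_of_contents(content: str, replace: bool = False) -> str:
--     toc_placeholder = "___toc_placeholder___"
--     lines = content.splitlines()
--     result_lines = lines
--     for i, line in enumerate(lines):
--         if line.strip() == "**TABLE OF CONTENTS**":
--             j = i + 1
--             while j < len(lines):
--                 stripped = lines[j].strip()
--                 if stripped and not stripped.startswith(("* [", "+ [", "- [")):
--                     break
--                 j += 1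
--             else:
--                 raise Exception("Unfinished Table of Contents found!")
--             result_lines = lines[:i] + [toc_placeholder] + lines[j:]
--             break
--     result = "\n".join(result_lines)
--     if replace:
--         SPHINX_TOC = """
--         ```{contents}
--         :caption: 'Table of Contents'
--         :depth: 3
--         :backlinks: none
--         ```
--         """
--         return result.replace(toc_placeholder, dedent(SPHINX_TOC).lstrip())
--     return result.replace(toc_placeholder, "")
-- ===== Notes on version B (the rewrite author's own statement) =====
-- stated objective: simpler
-- what changed: Replaced A's single pass threading stripping_toc/stripping_done flags through every line by a two-phase find-and-splice: locate the first '**TABLE OF CONTENTS**' line, skip forward over blank and bullet lines to the first body line, splice lines[:i] + [placeholder] + lines[j:]; Pre_ excludes inputs with a second marker line directly inside the TOC block being stripped, where A either raises or its re-entry into stripping mode (emitting an extra placeholder) is an accident of its flag machine.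
-- outside the precondition, e.g. on remove_old_table_of_contents('**TABLE OF CONTENTS**\n* [a]', False): A raises Exception, B raises Exception; on remove_old_table_of_contents('**TABLE OF CONTENTS**', False): A raises Exception, B raises Exception
import Mathlib
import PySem

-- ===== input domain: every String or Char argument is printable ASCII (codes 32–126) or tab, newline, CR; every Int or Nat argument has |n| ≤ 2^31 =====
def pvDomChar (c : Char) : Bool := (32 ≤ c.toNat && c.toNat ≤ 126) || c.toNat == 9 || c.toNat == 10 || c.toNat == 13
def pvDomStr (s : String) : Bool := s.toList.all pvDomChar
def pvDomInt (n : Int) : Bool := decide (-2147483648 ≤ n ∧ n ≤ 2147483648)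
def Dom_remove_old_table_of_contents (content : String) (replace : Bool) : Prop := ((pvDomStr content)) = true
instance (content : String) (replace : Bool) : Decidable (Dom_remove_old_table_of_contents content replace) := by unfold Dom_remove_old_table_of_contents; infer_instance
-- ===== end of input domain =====

-- B replaces A's flag-machine single pass by a find-the-marker-then-splice two-phase scan (simpler decomposition, same cost).

def pvMark : String := "**TABLE OF CONTENTS**"
def pvPH : String := "___toc_placeholder___"
def pvSphinx : String := "```{contents}\n:caption: 'Table of Contents'\n:depth: 3\n:backlinks: none\n```\n"
def pvIsBullet (s : String) : Bool :=
  PySem.Str.startswith s "* [" || PySem.Str.startswith s "+ [" || PySem.Str.startswith s "- ["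

-- ===== PORT A =====
def pvStepA (st : List String × Bool × Bool) (line : String) : List String × Bool × Bool :=
  let parsed := st.1
  let toc := st.2.1
  let done := st.2.2
  let s := PySem.Str.strip line
  if s == pvMark && !done then (parsed ++ [pvPH], true, done)
  else if toc then
    if s == "" then (parsed, toc, done)
    else if pvIsBullet s then (parsed, toc, done)
    else (parsed ++ [line], false, true)   -- stripping_toc := False, stripping_done := True, then append
  else (parsed ++ [line], toc, done)

def remove_old_table_of_contents (content : String) (replace : Bool) : String :=
  let st := (PySem.Str.splitlines content).foldl pvStepA ([], false, false)
  if st.2.1 && !st.2.2 then ""   -- Python raises here (excluded by Pre_)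
  else
    let c := PySem.Str.join "\n" st.1
    if replace then PySem.Str.replace c pvPH pvSphinx
    else PySem.Str.replace c pvPH ""

-- ===== PORT B =====
-- inner while loop of Source B: skip blank and bullet lines; none = loop exhausted (Python raises)
def pvScanAlt : List String → Option (List String)
  | [] => none
  | l :: t =>
    let s := PySem.Str.strip l
    if !(s == "") && !pvIsBullet s then some (l :: t)
    else pvScanAlt t

-- outer for loop of Source B: find the first marker line, splice; some lines = result_lines
def pvFindAlt : List String → Option (List String)
  | [] => some []
  | l :: t =>
    if PySem.Str.strip l == pvMark then
      (pvScanAlt t).map (fun rest => pvPH :: rest)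
    else (pvFindAlt t).map (l :: ·)

def remove_old_table_of_contents_alt (content : String) (replace : Bool) : String :=
  match pvFindAlt (PySem.Str.splitlines content) with
  | none => ""   -- Python raises here (excluded by Pre_)
  | some resultLines =>
    let result := PySem.Str.join "\n" resultLines
    if replace then PySem.Str.replace result pvPH pvSphinx
    else PySem.Str.replace result pvPH ""

-- ===== PRECONDITION & SPEC =====
def pvItem (s : String) : Bool := s == "" || pvIsBullet s

-- Pre_ excludes inputs with a second marker line directly inside the TOC block after the first
-- marker (there A either raises its unfinished-TOC exception, or its re-entry into stripping mode
-- — emitting an extra placeholder — is an accident of its flag machine), and inputs where the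
-- first marker is never followed by a body line (A raises there).
def Pre_remove_old_table_of_contents (content : String) (replace : Bool) : Prop :=
  (match (PySem.Str.splitlines content).findIdx? (fun l => PySem.Str.strip l == pvMark) with
   | none => true
   | some i =>
     match ((PySem.Str.splitlines content).drop (i+1)).dropWhile (fun l => pvItem (PySem.Str.strip l)) with
     | [] => false
     | h :: _ => !(PySem.Str.strip h == pvMark)) = true
instance (content : String) (replace : Bool) : Decidable (Pre_remove_old_table_of_contents content replace) := by
  unfold Pre_remove_old_table_of_contents; infer_instance

def pvWitness_remove_old_table_of_contents : String × Bool :=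
  ("# Title\n**TABLE OF CONTENTS**\n* [a](#a)\n\nBody text", false)

def Spec_remove_old_table_of_contents (content : String) (replace : Bool) (out : String) : Prop := out = remove_old_table_of_contents_alt content replace
instance (content : String) (replace : Bool) (out : String) : Decidable (Spec_remove_old_table_of_contents content replace out) := by unfold Spec_remove_old_table_of_contents; infer_instance

-- ===== CLAIM (what is proved, stated in full; the proofs are below) =====
def Claim_equal_remove_old_table_of_contents : Prop := ∀ (content : String) (replace : Bool), Dom_remove_old_table_of_contents content replace → Pre_remove_old_table_of_contents content replace → Spec_remove_old_table_of_contents content replace (remove_old_table_of_contents content replace)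

-- ===== LEMMAS AND PROOFS =====

theorem pvItem_mark : pvItem pvMark = false := by decide

-- step lemmas for A's state machine
theorem pvItem_cases (s : String) (h : pvItem s = true) :
    ((s == "") = true) ∨ (pvIsBullet s = true) :=
  Bool.or_eq_true_iff.mp (show ((s == "") || pvIsBullet s) = true from h)

theorem pvStepA_mark (acc : List String) (l : String) (h : (PySem.Str.strip l == pvMark) = true) :
    pvStepA (acc, false, false) l = (acc ++ [pvPH], true, false) := by
  unfold pvStepA; simp only [h]; rfl

theorem pvStepA_plain (acc : List String) (d : Bool) (l : String)
    (h : (PySem.Str.strip l == pvMark) = false ∨ d = true) :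
    pvStepA (acc, false, d) l = (acc ++ [l], false, d) := by
  have hc : (PySem.Str.strip l == pvMark && !d) = false := by
    rcases h with h | h
    · simp [h]
    · simp [h]
  unfold pvStepA; simp only [hc]; rfl

theorem pvStepA_toc_skip (acc : List String) (l : String)
    (hm : (PySem.Str.strip l == pvMark) = false) (hi : pvItem (PySem.Str.strip l) = true) :
    pvStepA (acc, true, false) l = (acc, true, false) := by
  unfold pvStepA
  rcases pvItem_cases _ hi with he | hb
  · simp only [hm, he]; rfl
  · by_cases he : (PySem.Str.strip l == "") = true
    · simp only [hm, he]; rfl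
    · simp only [hm, Bool.eq_false_iff.mpr he, hb]; rfl

theorem pvStepA_toc_break (acc : List String) (l : String)
    (hm : (PySem.Str.strip l == pvMark) = false) (hi : pvItem (PySem.Str.strip l) = false) :
    pvStepA (acc, true, false) l = (acc ++ [l], false, true) := by
  have h1 : (PySem.Str.strip l == "") = false := by
    cases hc : (PySem.Str.strip l == "") with
    | false => rfl
    | true => rw [show pvItem (PySem.Str.strip l) = ((PySem.Str.strip l == "") || pvIsBullet (PySem.Str.strip l)) from rfl, hc] at hi; simp at hi
  have h2 : pvIsBullet (PySem.Str.strip l) = false := by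
    cases hc : pvIsBullet (PySem.Str.strip l) with
    | false => rfl
    | true => rw [show pvItem (PySem.Str.strip l) = ((PySem.Str.strip l == "") || pvIsBullet (PySem.Str.strip l)) from rfl, hc] at hi; simp at hi
  unfold pvStepA
  simp only [hm, h1, h2]; rfl

-- step lemmas for B's line skip
theorem pvScanAlt_skip (l : String) (t : List String) (hi : pvItem (PySem.Str.strip l) = true) :
    pvScanAlt (l :: t) = pvScanAlt t := by
  have hc : (!(PySem.Str.strip l == "") && !pvIsBullet (PySem.Str.strip l)) = false := by
    rcases pvItem_cases _ hi with he | hb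
    · simp [he]
    · simp [hb]
  rw [pvScanAlt]; simp only [hc]; rfl

theorem pvScanAlt_break (l : String) (t : List String) (hi : pvItem (PySem.Str.strip l) = false) :
    pvScanAlt (l :: t) = some (l :: t) := by
  have h1 : (PySem.Str.strip l == "") = false := by
    cases hc : (PySem.Str.strip l == "") with
    | false => rfl
    | true => rw [show pvItem (PySem.Str.strip l) = ((PySem.Str.strip l == "") || pvIsBullet (PySem.Str.strip l)) from rfl, hc] at hi; simp at hi
  have h2 : pvIsBullet (PySem.Str.strip l) = false := by
    cases hc : pvIsBullet (PySem.Str.strip l) with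
    | false => rfl
    | true => rw [show pvItem (PySem.Str.strip l) = ((PySem.Str.strip l == "") || pvIsBullet (PySem.Str.strip l)) from rfl, hc] at hi; simp at hi
  rw [pvScanAlt]; simp only [h1, h2]; rfl

-- once stripping_done, A appends every remaining line verbatim
theorem pvFold_done (rest : List String) : ∀ acc : List String,
    rest.foldl pvStepA (acc, false, true) = (acc ++ rest, false, true) := by
  induction rest with
  | nil => intro acc; simp
  | cons l t ih =>
    intro acc
    rw [List.foldl_cons, pvStepA_plain acc true l (Or.inr rfl), ih]
    simp

-- while the TOC body lasts and stops at a non-marker body line, B's skip and A's stripping state agree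
theorem pvScan_agree (t : List String) : ∀ acc : List String,
    (match t.dropWhile (fun l => pvItem (PySem.Str.strip l)) with
     | [] => false
     | h :: _ => !(PySem.Str.strip h == pvMark)) = true →
    pvScanAlt t = some (t.dropWhile (fun l => pvItem (PySem.Str.strip l))) ∧
    t.foldl pvStepA (acc, true, false) =
      (acc ++ t.dropWhile (fun l => pvItem (PySem.Str.strip l)), false, true) := by
  induction t with
  | nil => intro acc h; simp at h
  | cons l t ih =>
    intro acc h
    by_cases hi : pvItem (PySem.Str.strip l) = true
    · have hm : (PySem.Str.strip l == pvMark) = false := by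
        by_contra hc
        have heq : PySem.Str.strip l = pvMark := eq_of_beq (Bool.of_not_eq_false hc)
        rw [heq, pvItem_mark] at hi; cases hi
      have hdw : List.dropWhile (fun l => pvItem (PySem.Str.strip l)) (l :: t)
               = List.dropWhile (fun l => pvItem (PySem.Str.strip l)) t := by
        rw [List.dropWhile_cons]; simp only [hi, if_true]
      rw [hdw] at h ⊢
      obtain ⟨h1, h2⟩ := ih acc h
      exact ⟨by rw [pvScanAlt_skip l t hi, h1],
             by rw [List.foldl_cons, pvStepA_toc_skip acc l hm hi, h2]⟩
    · have hi' : pvItem (PySem.Str.strip l) = false := Bool.eq_false_iff.mpr hi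
      have hdw : List.dropWhile (fun l => pvItem (PySem.Str.strip l)) (l :: t) = l :: t := by
        rw [List.dropWhile_cons]; simp only [hi', Bool.false_eq_true, if_false]
      rw [hdw] at h ⊢
      have hm : (PySem.Str.strip l == pvMark) = false := by simpa using h
      refine ⟨pvScanAlt_break l t hi', ?_⟩
      rw [List.foldl_cons, pvStepA_toc_break acc l hm hi', pvFold_done]
      simp

-- under Pre_'s condition, B's find-and-splice equals A's full fold
theorem pvFind_agree (lines : List String) : ∀ acc : List String,
    (match lines.findIdx? (fun l => PySem.Str.strip l == pvMark) with
     | none => true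
     | some i =>
       match (lines.drop (i+1)).dropWhile (fun l => pvItem (PySem.Str.strip l)) with
       | [] => false
       | h :: _ => !(PySem.Str.strip h == pvMark)) = true →
    ∃ ls d, pvFindAlt lines = some ls ∧
      lines.foldl pvStepA (acc, false, false) = (acc ++ ls, false, d) := by
  induction lines with
  | nil =>
    intro acc _
    exact ⟨[], false, rfl, by simp⟩
  | cons l t ih =>
    intro acc h
    by_cases hm : (PySem.Str.strip l == pvMark) = true
    · rw [List.findIdx?_cons, hm] at h
      simp only [List.drop_succ_cons] at h
      obtain ⟨h1, h2⟩ := pvScan_agree t (acc ++ [pvPH]) h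
      refine ⟨pvPH :: t.dropWhile (fun l => pvItem (PySem.Str.strip l)), true, ?_, ?_⟩
      · simp only [pvFindAlt, hm, if_true, h1, Option.map_some]
      · rw [List.foldl_cons, pvStepA_mark acc l hm, h2]
        simp
    · have hm' := Bool.eq_false_iff.mpr hm
      rw [List.findIdx?_cons, hm'] at h
      simp only [Bool.false_eq_true, if_false] at h
      have h' : (match t.findIdx? (fun l => PySem.Str.strip l == pvMark) with
         | none => true
         | some i =>
           match (t.drop (i+1)).dropWhile (fun l => pvItem (PySem.Str.strip l)) with
           | [] => false
           | h :: _ => !(PySem.Str.strip h == pvMark)) = true := by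
        cases hf : t.findIdx? (fun l => PySem.Str.strip l == pvMark) with
        | none => simp
        | some i =>
          rw [hf] at h
          simp only [Option.map_some] at h
          simpa [List.drop_succ_cons] using h
      obtain ⟨ls, d, h1, h2⟩ := ih (acc ++ [l]) h'
      refine ⟨l :: ls, d, ?_, ?_⟩
      · simp only [pvFindAlt, hm', Bool.false_eq_true, if_false, h1, Option.map_some]
      · rw [List.foldl_cons, pvStepA_plain acc false l (Or.inl hm'), h2]
        simp

-- ===== VERDICT (by name: the statement is the Claim_ definition above) =====
theorem remove_old_table_of_contents_spec : Claim_equal_remove_old_table_of_contents := by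
  intro content replace _dom hpre
  unfold Spec_remove_old_table_of_contents
  unfold Pre_remove_old_table_of_contents at hpre
  obtain ⟨ls, d, h1, h2⟩ := pvFind_agree (PySem.Str.splitlines content) [] hpre
  unfold remove_old_table_of_contents remove_old_table_of_contents_alt
  rw [h1, h2]
  simp
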